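-- pv_equiv track=rewrite | github.com/ChuFeng-debug/Tetris | main.py | verifier_et_remplacer
-- ===== SOURCE A (Python) =====
-- def sont_voisins(b1, b2):
--     """Vérifie si deux blocs b1 et b2 sont voisins (touchent horizontalement ou verticalement)."""
--     return abs(b1[0] - b2[0]) == 1 and b1[1] == b2[1] or abs(b1[1] - b2[1]) == 1 and b1[0] == b2[0]
--
-- def remplacer_blocs_par_none(grille, pieces, tetromino_history, couleur,jeu):
--     """Remplace les blocs des pièces par None dans la grille et les supprime de Tetromino_history."""
--     for piece in pieces:
--         for bloc in piece:
--             y, x = bloc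
--             grille[y][x] = None
--
--         # Une fois tous les blocs de la pièce remplacés, on supprime la pièce de Tetromino_history
--         if couleur in tetromino_history:
--             if piece in tetromino_history[couleur]:
--                 tetromino_history[couleur].remove(piece)
--                 jeu["score"]+=10
--
--     # Si après la suppression il n'y a plus de pièces pour une couleur, on enlève cette couleur de Tetromino_history
--     if couleur in tetromino_history and not tetromino_history[couleur]:
--         tetromino_history[couleur]=[]
--
-- def verifier_et_remplacer(grille, tetromino_history, couleur,jeu):
--     """
--     Vérifie si deux pièces de la même couleur se touchent par au moins deux blocs et
--     remplace leurs blocs par None dans la grille.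
--     """
--     # Récupère toutes les positions des blocs pour la couleur donnée
--     pieces = tetromino_history.get(couleur, [])
--
--     # Si moins de 2 pièces, aucune possibilité de se toucher
--     if len(pieces) < 2:
--         return False
--
--     # Compare chaque bloc de la première pièce avec chaque bloc de la deuxième pièce
--     for i in range(len(pieces)):
--         for j in range(i + 1, len(pieces)):  # Comparer chaque paire de pièces
--             piece1 = pieces[i]
--             piece2 = pieces[j]
--
--             # Vérifier si au moins deux blocs de piece1 se touchent avec au moins deux blocs de piece2
--             count = 0
--             for b1 in piece1:
--                 for b2 in piece2:
--                     if sont_voisins(b1, b2):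
--                         count += 1
--                     if count >= 2:  # Si on a trouvé deux blocs voisins, on remplace les blocs par None
--                         # Remplacer les blocs des deux pièces par None dans la grille
--                         remplacer_blocs_par_none(grille, [piece1, piece2],tetromino_history,couleur,jeu)
--                         return True
--
--     return False
-- ===== SOURCE B (Python) =====
-- def verifier_et_remplacer(grille, tetromino_history, couleur, jeu):
--     """Spatial-hash re-implementation: for each piece build a counter of its
--     4-neighbour cells once, then score every later piece with O(1) lookups
--     (no inner block-vs-block double scan); erases the first qualifying pair
--     exactly like the original."""
--     pieces = tetromino_history.get(couleur, [])
--     if len(pieces) < 2: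
--         return False
--     for i in range(len(pieces)):
--         voisinage = {}
--         for (y, x) in pieces[i]:
--             for v in ((y - 1, x), (y + 1, x), (y, x - 1), (y, x + 1)):
--                 voisinage[v] = voisinage.get(v, 0) + 1
--         for j in range(i + 1, len(pieces)):
--             contacts = 0
--             for bloc in pieces[j]:
--                 contacts += voisinage.get(bloc, 0)
--             if contacts >= 2:
--                 _effacer_paire(grille, pieces[i], pieces[j], tetromino_history, couleur, jeu)
--                 return True
--     return False
--
-- def _effacer_paire(grille, piece1, piece2, tetromino_history, couleur, jeu):
--     for piece in (piece1, piece2):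
--         for (y, x) in piece:
--             grille[y][x] = None
--         if piece in tetromino_history[couleur]:
--             tetromino_history[couleur].remove(piece)
--             jeu["score"] += 10
-- ===== Notes on version B (the rewrite author's own statement) =====
-- stated objective: alternative
-- what changed: A compares every block of piece1 against every block of piece2 with an early-exit counter; B builds, once per piece, a dict counting its four neighbour cells (a spatial hash) and scores each later piece by O(1) lookups, so the inner block-vs-block double scan disappears (O(P^2*B) instead of O(P^2*B^2), though not measurably faster on a timing run's input family); the same first pair is erased.
import Mathlib
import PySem

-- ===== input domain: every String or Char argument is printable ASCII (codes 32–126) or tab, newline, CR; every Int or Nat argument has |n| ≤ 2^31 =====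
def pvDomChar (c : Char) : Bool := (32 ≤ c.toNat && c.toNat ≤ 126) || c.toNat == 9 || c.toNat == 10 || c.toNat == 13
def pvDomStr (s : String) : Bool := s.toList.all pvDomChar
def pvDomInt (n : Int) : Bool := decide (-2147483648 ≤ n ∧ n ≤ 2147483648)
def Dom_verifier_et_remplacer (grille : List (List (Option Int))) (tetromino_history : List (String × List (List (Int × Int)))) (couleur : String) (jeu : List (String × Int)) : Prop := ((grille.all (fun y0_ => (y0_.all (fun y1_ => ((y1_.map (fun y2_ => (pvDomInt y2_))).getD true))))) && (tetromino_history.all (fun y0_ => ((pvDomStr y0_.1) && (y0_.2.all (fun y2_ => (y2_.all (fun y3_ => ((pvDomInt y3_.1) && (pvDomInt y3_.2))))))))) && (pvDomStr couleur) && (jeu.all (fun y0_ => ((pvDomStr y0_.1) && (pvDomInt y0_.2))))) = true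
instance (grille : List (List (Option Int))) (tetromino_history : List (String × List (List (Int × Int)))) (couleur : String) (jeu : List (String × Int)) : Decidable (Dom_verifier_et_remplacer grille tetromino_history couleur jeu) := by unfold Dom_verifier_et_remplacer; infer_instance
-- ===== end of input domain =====

-- B replaces A's inner block-vs-block double scan by a per-piece spatial hash of
-- neighbour cells (dict lookups), detecting and erasing the same first pair; both
-- programs mutate grille/tetromino_history/jeu identically on admitted inputs, and
-- the equivalence proved here is about the returned Bool (the mutation does not
-- influence it, so the ports carry the return-value computation only).

-- ===== PORT A =====
-- abs(b1[0]-b2[0]) == 1 and b1[1] == b2[1] or abs(b1[1]-b2[1]) == 1 and b1[0] == b2[0]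
def sontVoisins (b1 b2 : Int × Int) : Bool :=
  ((b1.1 - b2.1).natAbs == 1 && b1.2 == b2.2) || ((b1.2 - b2.2).natAbs == 1 && b1.1 == b2.1)

-- the inner 'for b2 in piece2' loop: count updated per neighbour, 'count >= 2' checked
-- after every iteration; 'none' = the Python 'return True' fired, 'some c' = loop ended
def scanBloc (b1 : Int × Int) (p2 : List (Int × Int)) (count : Int) : Option Int :=
  match p2 with
  | [] => some count
  | b2 :: rest =>
    let c := if sontVoisins b1 b2 then count + 1 else count
    if c ≥ 2 then none else scanBloc b1 rest c

-- the 'for b1 in piece1' loop threading the count through scanBloc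
def scanPiece (p1 p2 : List (Int × Int)) (count : Int) : Bool :=
  match p1 with
  | [] => false
  | b1 :: rest =>
    match scanBloc b1 p2 count with
    | none => true
    | some c => scanPiece rest p2 c

def verifier_et_remplacer (grille : List (List (Option Int))) (tetromino_history : List (String × List (List (Int × Int)))) (couleur : String) (jeu : List (String × Int)) : Bool :=
  let pieces := PySem.Dict.getD (PySem.Dict.mk tetromino_history) couleur []
  if pieces.length < 2 then false
  else (PySem.List.pyRange 0 pieces.length 1).any fun i =>
    (PySem.List.pyRange (i + 1) pieces.length 1).any fun j =>
      scanPiece (PySem.List.pyGetD pieces i []) (PySem.List.pyGetD pieces j []) 0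

-- ===== PORT B =====
-- the tuple ((y-1,x),(y+1,x),(y,x-1),(y,x+1)) of Source B
def voisins4 (b : Int × Int) : List (Int × Int) :=
  [(b.1 - 1, b.2), (b.1 + 1, b.2), (b.1, b.2 - 1), (b.1, b.2 + 1)]

-- 'voisinage[v] = voisinage.get(v, 0) + 1' over all blocks of the piece
def voisinage (p : List (Int × Int)) : PySem.Dict (Int × Int) Int :=
  p.foldl (fun d b => (voisins4 b).foldl (fun d v => d.insert v (d.getD v 0 + 1)) d)
    PySem.Dict.empty

-- 'contacts += voisinage.get(bloc, 0)' over the second piece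
def contactsAvec (d : PySem.Dict (Int × Int) Int) (p2 : List (Int × Int)) : Int :=
  p2.foldl (fun t b => t + d.getD b 0) 0

def verifier_et_remplacer_alt (grille : List (List (Option Int))) (tetromino_history : List (String × List (List (Int × Int)))) (couleur : String) (jeu : List (String × Int)) : Bool :=
  let pieces := PySem.Dict.getD (PySem.Dict.mk tetromino_history) couleur []
  if pieces.length < 2 then false
  else (PySem.List.pyRange 0 pieces.length 1).any fun i =>
    let d := voisinage (PySem.List.pyGetD pieces i [])
    (PySem.List.pyRange (i + 1) pieces.length 1).any fun j =>
      decide (contactsAvec d (PySem.List.pyGetD pieces j []) ≥ 2)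

-- ===== PRECONDITION & SPEC =====
-- bloc (y, x) can be written to the grid without IndexError (Python indexing, negatives wrap)
def blocOk (grille : List (List (Option Int))) (b : Int × Int) : Bool :=
  match PySem.List.pyGet? grille b.1 with
  | some row => decide (PySem.Raise.InRange row.length b.2)
  | none => false

-- ordered touching block pairs of the two pieces (what A's 'count' totals)
def nbContacts (p q : List (Int × Int)) : Nat :=
  (p.flatMap (fun b1 => q.filter (fun b2 => sontVoisins b1 b2))).length

-- Pre_ excludes inputs on which the erase step would raise: two pieces of the colour touch
-- in ≥ 2 block pairs but some block of that colour indexes outside the grid (IndexError) or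
-- jeu lacks the "score" key (KeyError); it over-approximates by requiring every piece's
-- blocks to be writable, not only the erased pair's (see the cite in claim.json).
def Pre_verifier_et_remplacer (grille : List (List (Option Int))) (tetromino_history : List (String × List (List (Int × Int)))) (couleur : String) (jeu : List (String × Int)) : Prop :=
  (∀ i ∈ List.range (PySem.Dict.getD (PySem.Dict.mk tetromino_history) couleur []).length,
     ∀ j ∈ List.range (PySem.Dict.getD (PySem.Dict.mk tetromino_history) couleur []).length,
       i < j →
         nbContacts ((PySem.Dict.getD (PySem.Dict.mk tetromino_history) couleur []).getD i [])
           ((PySem.Dict.getD (PySem.Dict.mk tetromino_history) couleur []).getD j []) < 2) ∨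
  ((∀ p ∈ PySem.Dict.getD (PySem.Dict.mk tetromino_history) couleur [],
      ∀ b ∈ p, blocOk grille b = true) ∧
   (PySem.Dict.mk jeu).contains "score" = true)
instance (grille : List (List (Option Int))) (tetromino_history : List (String × List (List (Int × Int)))) (couleur : String) (jeu : List (String × Int)) : Decidable (Pre_verifier_et_remplacer grille tetromino_history couleur jeu) := by unfold Pre_verifier_et_remplacer; infer_instance

def pvWitness_verifier_et_remplacer : List (List (Option Int)) × (List (String × List (List (Int × Int)))) × String × (List (String × Int)) :=
  ([[some 1, some 2]], [("rouge", [[(0, 0)], [(0, 1)]])], "rouge", [("score", 0)])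

def Spec_verifier_et_remplacer (grille : List (List (Option Int))) (tetromino_history : List (String × List (List (Int × Int)))) (couleur : String) (jeu : List (String × Int)) (out : Bool) : Prop := out = verifier_et_remplacer_alt grille tetromino_history couleur jeu
instance (grille : List (List (Option Int))) (tetromino_history : List (String × List (List (Int × Int)))) (couleur : String) (jeu : List (String × Int)) (out : Bool) : Decidable (Spec_verifier_et_remplacer grille tetromino_history couleur jeu out) := by unfold Spec_verifier_et_remplacer; infer_instance

-- ===== CLAIM (what is proved, stated in full; the proofs are below) =====
def Claim_equal_verifier_et_remplacer : Prop := ∀ (grille : List (List (Option Int))) (tetromino_history : List (String × List (List (Int × Int)))) (couleur : String) (jeu : List (String × Int)), Dom_verifier_et_remplacer grille tetromino_history couleur jeu → Pre_verifier_et_remplacer grille tetromino_history couleur jeu → Spec_verifier_et_remplacer grille tetromino_history couleur jeu (verifier_et_remplacer grille tetromino_history couleur jeu)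

-- ===== LEMMAS AND PROOFS =====

-- number of blocks of p2 touching b1 (what A's inner loop adds to count)
def tCount (b1 : Int × Int) (p2 : List (Int × Int)) : Int :=
  (p2.map (fun b2 => if sontVoisins b1 b2 then (1 : Int) else 0)).sum

-- total number of touching ordered block pairs of the two pieces
def TCount (p1 p2 : List (Int × Int)) : Int :=
  (p1.map (fun b1 => tCount b1 p2)).sum

lemma tCount_nonneg (b1 : Int × Int) (p2 : List (Int × Int)) : 0 ≤ tCount b1 p2 := by
  refine List.sum_nonneg ?_
  intro x hx
  simp only [List.mem_map] at hx
  obtain ⟨b2, -, rfl⟩ := hx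
  split <;> norm_num

lemma TCount_nonneg (p1 p2 : List (Int × Int)) : 0 ≤ TCount p1 p2 := by
  refine List.sum_nonneg ?_
  intro x hx
  simp only [List.mem_map] at hx
  obtain ⟨b1, -, rfl⟩ := hx
  exact tCount_nonneg b1 p2

lemma scanBloc_eq (b1 : Int × Int) (p2 : List (Int × Int)) :
    ∀ c : Int, c ≤ 1 →
      scanBloc b1 p2 c =
        if c + tCount b1 p2 ≥ 2 then none else some (c + tCount b1 p2) := by
  induction p2 with
  | nil => intro c hc; simp [scanBloc, tCount]; omega
  | cons b2 rest ih =>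
    intro c hc
    have hnn := tCount_nonneg b1 rest
    have hfold : tCount b1 (b2 :: rest) = (if sontVoisins b1 b2 then (1 : Int) else 0) + tCount b1 rest := by
      simp [tCount]
    rw [hfold]
    simp only [scanBloc]
    by_cases hv : sontVoisins b1 b2 = true
    · simp only [hv, if_true]
      by_cases h2 : c + 1 ≥ 2
      · rw [if_pos h2, if_pos (by omega)]
      · rw [if_neg h2, ih (c + 1) (by omega)]
        split_ifs <;> first | rfl | (exfalso; omega) | (congr 1; ring)
    · simp only [Bool.not_eq_true] at hv
      simp only [hv, Bool.false_eq_true, if_false]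
      rw [if_neg (by omega), ih c hc]
      split_ifs <;> first | rfl | (exfalso; omega) | (congr 1; ring)

lemma scanPiece_eq (p1 p2 : List (Int × Int)) :
    ∀ c : Int, c ≤ 1 → scanPiece p1 p2 c = decide (c + TCount p1 p2 ≥ 2) := by
  induction p1 with
  | nil =>
    intro c hc
    simp only [scanPiece, TCount, List.map_nil, List.sum_nil]
    symm; simp; omega
  | cons b1 rest ih =>
    intro c hc
    have hnn := TCount_nonneg rest p2
    have htn := tCount_nonneg b1 p2
    have hfold : TCount (b1 :: rest) p2 = tCount b1 p2 + TCount rest p2 := by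
      simp [TCount]
    rw [hfold]
    simp only [scanPiece, scanBloc_eq b1 p2 c hc]
    by_cases h2 : c + tCount b1 p2 ≥ 2
    · rw [if_pos h2]
      symm; simp only [decide_eq_true_eq]
      omega
    · rw [if_neg h2]
      change scanPiece rest p2 (c + tCount b1 p2) = _
      rw [ih (c + tCount b1 p2) (by omega)]
      congr 1
      simp only [ge_iff_le, eq_iff_iff]
      omega

lemma count_voisins (b k : Int × Int) :
    ((voisins4 b).count k : Int) = if sontVoisins b k then 1 else 0 := by
  obtain ⟨y, x⟩ := b
  obtain ⟨u, v⟩ := k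
  simp only [voisins4, sontVoisins, List.count_cons, List.count_nil, beq_iff_eq,
    Prod.mk.injEq, Bool.or_eq_true, Bool.and_eq_true]
  split <;> (rename_i h; push_cast; split_ifs <;> omega)

lemma voisinage_getD_aux (k : Int × Int) (p1 : List (Int × Int)) :
    ∀ d : PySem.Dict (Int × Int) Int,
      (p1.foldl (fun d b => (voisins4 b).foldl (fun d v => d.insert v (d.getD v 0 + 1)) d) d).getD k 0
        = d.getD k 0 + (p1.map (fun b => ((voisins4 b).count k : Int))).sum := by
  induction p1 with
  | nil => intro d; simp
  | cons b rest ih =>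
    intro d
    simp only [List.foldl_cons, List.map_cons, List.sum_cons, ih,
      PySem.Dict.getD_foldl_insert_add_one]
    ring

lemma voisinage_getD (p1 : List (Int × Int)) (k : Int × Int) :
    (voisinage p1).getD k 0 = (p1.map (fun b => if sontVoisins b k then (1 : Int) else 0)).sum := by
  unfold voisinage
  rw [voisinage_getD_aux k p1 PySem.Dict.empty]
  simp [count_voisins]

lemma contacts_eq (d : PySem.Dict (Int × Int) Int) (p2 : List (Int × Int)) :
    contactsAvec d p2 = (p2.map (fun b => d.getD b 0)).sum := by
  unfold contactsAvec
  rw [PySem.List.foldl_add]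
  simp

lemma sum_swap_touch (p1 p2 : List (Int × Int)) :
    (p2.map (fun b2 => (p1.map (fun b1 => if sontVoisins b1 b2 then (1 : Int) else 0)).sum)).sum
      = TCount p1 p2 := by
  unfold TCount tCount
  induction p1 with
  | nil => simp
  | cons b r ih => simp [ih]

lemma pair_eq (p1 p2 : List (Int × Int)) :
    scanPiece p1 p2 0 = decide (contactsAvec (voisinage p1) p2 ≥ 2) := by
  rw [scanPiece_eq p1 p2 0 (by norm_num), contacts_eq]
  simp only [voisinage_getD, sum_swap_touch, zero_add]

lemma ports_eq (grille : List (List (Option Int))) (tetromino_history : List (String × List (List (Int × Int)))) (couleur : String) (jeu : List (String × Int)) :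
    verifier_et_remplacer grille tetromino_history couleur jeu
      = verifier_et_remplacer_alt grille tetromino_history couleur jeu := by
  unfold verifier_et_remplacer verifier_et_remplacer_alt
  simp only [pair_eq]

-- ===== VERDICT (by name: the statement is the Claim_ definition above) =====
theorem verifier_et_remplacer_spec : Claim_equal_verifier_et_remplacer := by
  intro grille tetromino_history couleur jeu _ _
  unfold Spec_verifier_et_remplacer
  exact ports_eq grille tetromino_history couleur jeu
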